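-- pv_equiv track=rewrite | github.com/inesqmorais/Foundations-of-Programming-Project | Entrega2.py | digramas
-- ===== SOURCE A (Python) =====
-- def digramas(mens):
--     msg = ''
--     for i in mens:
--         if i != ' ':
--             msg=msg+i
--     lista = []
--     while len(msg) > 0:
--         if len(msg) != 1 and msg[0] != msg[1]:
--             lista += msg[0:2]
--             msg = msg[2:]
--         else:
--             lista += msg[0] + 'X'
--             msg = msg[1:]
--
--     return ''.join(lista)
-- ===== SOURCE B (Python) =====
-- def digramas(mens):
--     s = [c for c in mens if c != ' ']
--     out = []
--     i = 0
--     n = len(s)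
--     while i < n:
--         if i + 1 < n and s[i] != s[i + 1]:
--             out.append(s[i])
--             out.append(s[i + 1])
--             i += 2
--         else:
--             out.append(s[i])
--             out.append('X')
--             i += 1
--     return ''.join(out)
-- ===== Notes on version B (the rewrite author's own statement) =====
-- stated objective: faster
-- what changed: B filters spaces once and walks the filtered list with an index pointer appending to an output list, instead of A's repeated string concatenation and quadratic slicing/rebuilding of the remaining message.
import Mathlib
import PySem

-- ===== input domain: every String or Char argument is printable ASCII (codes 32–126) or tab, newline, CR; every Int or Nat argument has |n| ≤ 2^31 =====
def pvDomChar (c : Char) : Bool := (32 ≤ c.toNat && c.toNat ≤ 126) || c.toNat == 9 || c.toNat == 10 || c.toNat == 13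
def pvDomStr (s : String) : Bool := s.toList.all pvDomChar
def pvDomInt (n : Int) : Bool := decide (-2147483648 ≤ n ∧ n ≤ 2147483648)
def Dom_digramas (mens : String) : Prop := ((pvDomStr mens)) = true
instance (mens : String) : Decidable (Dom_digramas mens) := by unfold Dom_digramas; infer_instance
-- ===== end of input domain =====

-- B replaces A's quadratic slice-and-rebuild digram loop with a single linear pass over the space-filtered
-- characters (objective: faster, measured asymptotic speed-up).
-- ===== PORT A =====
def digramasMsg (mens : String) : List Char :=
  mens.toList.foldl (fun msg i => if i ≠ ' ' then msg ++ [i] else msg) []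

def digramasLoop (lista : List Char) (msg : List Char) : List Char :=
  match msg with
  | [] => lista
  | [c] => digramasLoop (lista ++ [c, 'X']) []
  | c :: d :: rest' =>
    if c ≠ d then digramasLoop (lista ++ [c, d]) rest'
    else digramasLoop (lista ++ [c, 'X']) (d :: rest')
termination_by msg.length
decreasing_by all_goals simp

def digramas (mens : String) : String :=
  String.ofList (digramasLoop [] (digramasMsg mens))

-- ===== PORT B =====
def digramasAltLoop : List Char → List Char
  | [] => []
  | [c] => [c, 'X']
  | c :: d :: rest =>
    if c ≠ d then c :: d :: digramasAltLoop rest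
    else c :: 'X' :: digramasAltLoop (d :: rest)

def digramas_alt (mens : String) : String :=
  String.ofList (digramasAltLoop (mens.toList.filter (· ≠ ' ')))

-- ===== PRECONDITION & SPEC =====
def Spec_digramas (mens : String) (out : String) : Prop := out = digramas_alt mens
instance (mens : String) (out : String) : Decidable (Spec_digramas mens out) := by unfold Spec_digramas; infer_instance

-- ===== CLAIM (what is proved, stated in full; the proofs are below) =====
def Claim_equal_digramas : Prop := ∀ (mens : String), Dom_digramas mens → Spec_digramas mens (digramas mens)

-- ===== LEMMAS AND PROOFS =====
theorem digramasMsg_eq (mens : String) :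
    digramasMsg mens = mens.toList.filter (· ≠ ' ') := by
  unfold digramasMsg
  suffices h : ∀ (l : List Char) (acc : List Char),
      l.foldl (fun msg i => if i ≠ ' ' then msg ++ [i] else msg) acc = acc ++ l.filter (· ≠ ' ') by
    simpa using h mens.toList []
  intro l
  induction l with
  | nil => simp
  | cons c t ih =>
    intro acc
    rw [List.foldl_cons, ih]
    by_cases hc : c = ' ' <;> simp [hc]

theorem digramasLoop_eq (msg : List Char) : ∀ (lista : List Char),
    digramasLoop lista msg = lista ++ digramasAltLoop msg := by
  induction msg using digramasAltLoop.induct with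
  | case1 => intro lista; simp [digramasLoop, digramasAltLoop]
  | case2 c => intro lista; simp [digramasLoop, digramasAltLoop]
  | case3 c d rest h ih =>
    intro lista; rw [digramasLoop]; simp only [digramasAltLoop, ih]; simp [h]
  | case4 c d rest h ih =>
    intro lista; rw [digramasLoop]; simp only [digramasAltLoop, ih]; simp [h]

-- ===== VERDICT (by name: the statement is the Claim_ definition above) =====
theorem digramas_spec : Claim_equal_digramas := by
  intro mens _
  unfold Spec_digramas digramas digramas_alt
  rw [digramasMsg_eq, digramasLoop_eq]
  simp
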